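-- pv_equiv track=rewrite | github.com/FumingYang-Felix/Sparse-Graph-Reconstruction-and-Seriation-for-Large-Scale-Image-Stacks | code/Graph-Condensation-Densification.py | create_proximity_mask
-- ===== SOURCE A (Python) =====
-- def create_proximity_mask(linear_order, proximity_window=10):
--     """
--     Create proximity mask from linear order - nodes close in order are permissible
--
--     Args:
--         linear_order: List of sections in linear order
--         proximity_window: Maximum distance in order to consider permissible
--
--     Returns:
--         Set of permissible (sec1, sec2) pairs
--     """
--     permissible_pairs = set()
--
--     # Create position mapping
--     position = {sec: i for i, sec in enumerate(linear_order)}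
--
--     # Add all pairs within proximity window
--     for i, sec1 in enumerate(linear_order):
--         for j, sec2 in enumerate(linear_order):
--             if i != j and abs(i - j) <= proximity_window:
--                 permissible_pairs.add((sec1, sec2))
--
--     return permissible_pairs
-- ===== SOURCE B (Python) =====
-- def create_proximity_mask(linear_order, proximity_window=10):
--     """Windowed re-implementation: for each position i, take the two slices of
--     indices [max(0,i-w), i) and (i, min(n,i+w+1)) instead of scanning the whole
--     list, and bulk-insert them with set.update."""
--     permissible_pairs = set()
--     n = len(linear_order)
--     for i, sec1 in enumerate(linear_order):
--         start = max(0, i - proximity_window)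
--         stop = min(n, i + proximity_window + 1)
--         if stop <= start:
--             continue
--         permissible_pairs.update([(sec1, sec2) for sec2 in linear_order[start:i]])
--         permissible_pairs.update([(sec1, sec2) for sec2 in linear_order[i + 1:stop]])
--     return permissible_pairs
-- ===== Notes on version B (the rewrite author's own statement) =====
-- stated objective: alternative
-- what changed: The inner pass over the whole list (with an i!=j and abs(i-j)<=w test) is replaced by bulk set.update of the two window slices linear_order[max(0,i-w):i] and linear_order[i+1:i+w+1], and the unused position dict is dropped; this does O(n*min(w,n)) window work instead of n^2 tests, though for the large windows a timing run generates the pair set itself is Theta(n^2), so no speed-up was measured.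
import Mathlib
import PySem

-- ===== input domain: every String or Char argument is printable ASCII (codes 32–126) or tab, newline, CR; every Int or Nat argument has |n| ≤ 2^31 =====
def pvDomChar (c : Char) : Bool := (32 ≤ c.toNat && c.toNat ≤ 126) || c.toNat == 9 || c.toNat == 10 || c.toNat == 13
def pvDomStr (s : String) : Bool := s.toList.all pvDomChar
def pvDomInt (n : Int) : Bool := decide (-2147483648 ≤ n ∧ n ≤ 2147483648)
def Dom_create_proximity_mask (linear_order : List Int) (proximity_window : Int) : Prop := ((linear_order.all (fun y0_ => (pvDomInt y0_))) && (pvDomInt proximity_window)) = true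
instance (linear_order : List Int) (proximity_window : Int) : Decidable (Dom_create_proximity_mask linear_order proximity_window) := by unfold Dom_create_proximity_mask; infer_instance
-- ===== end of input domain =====

-- B replaces A's full inner scan (with an i≠j, abs(i-j)≤w test per element) by bulk set.update of the two proximity-window slices; return value proved equal.
-- ===== PORT A =====
def create_proximity_mask (linear_order : List Int) (proximity_window : Int) : List (Int × Int) :=
  let permissible_pairs : PySem.Set (Int × Int) := PySem.Set.empty
  let _position : PySem.Dict Int Int :=
    (PySem.List.enumerate linear_order 0).foldl (fun d p => d.insert p.2 p.1) PySem.Dict.empty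
  (PySem.List.enumerate linear_order 0).foldl (fun s p =>
    (PySem.List.enumerate linear_order 0).foldl (fun s q =>
      if p.1 ≠ q.1 ∧ |p.1 - q.1| ≤ proximity_window then PySem.Set.add s (p.2, q.2) else s) s)
    permissible_pairs


-- ===== PORT B =====
def create_proximity_mask_alt (linear_order : List Int) (proximity_window : Int) : List (Int × Int) :=
  let n : Int := linear_order.length
  (PySem.List.enumerate linear_order 0).foldl (fun s p =>
    let start := max 0 (p.1 - proximity_window)
    let stop := min n (p.1 + proximity_window + 1)
    if stop ≤ start then s
    else
      PySem.Set.update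
        (PySem.Set.update s
          ((PySem.List.slice linear_order (some start) (some p.1)).map (fun sec2 => (p.2, sec2))))
        ((PySem.List.slice linear_order (some (p.1 + 1)) (some stop)).map (fun sec2 => (p.2, sec2))))
    (PySem.Set.empty : PySem.Set (Int × Int))


-- ===== PRECONDITION & SPEC =====
def Spec_create_proximity_mask (linear_order : List Int) (proximity_window : Int) (out : List (Int × Int)) : Prop := out = create_proximity_mask_alt linear_order proximity_window
instance (linear_order : List Int) (proximity_window : Int) (out : List (Int × Int)) : Decidable (Spec_create_proximity_mask linear_order proximity_window out) := by unfold Spec_create_proximity_mask; infer_instance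

-- ===== CLAIM (what is proved, stated in full; the proofs are below) =====
def Claim_equal_create_proximity_mask : Prop := ∀ (linear_order : List Int) (proximity_window : Int), Dom_create_proximity_mask linear_order proximity_window → Spec_create_proximity_mask linear_order proximity_window (create_proximity_mask linear_order proximity_window)

-- ===== LEMMAS AND PROOFS =====
lemma foldl_ite_filter {α β : Type} (l : List α) (P : α → Prop) [DecidablePred P]
    (f : β → α → β) (init : β) :
    l.foldl (fun s x => if P x then f s x else s) init
      = (l.filter (fun x => decide (P x))).foldl f init := by
  rw [List.foldl_filter]
  simp

lemma ranges_eq (n w i : Int) (hi0 : 0 ≤ i) (hin : i < n) :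
    (PySem.List.pyRange 0 n 1).filter (fun j => decide (i ≠ j ∧ |i - j| ≤ w))
      = (PySem.List.pyRange (max 0 (i - w)) (min n (i + w + 1)) 1).filter (fun j => decide (j ≠ i)) := by
  by_cases hw : w < 0
  · rw [List.filter_eq_nil_iff.mpr, PySem.List.pyRange_one_eq_nil (by omega), List.filter_nil]
    intro j hj
    simp only [PySem.List.mem_pyRange_one] at hj
    have := abs_nonneg (i - j)
    simp only [decide_eq_true_eq, not_and]
    intro _
    omega
  · have hw' : 0 ≤ w := by omega
    have h1 : (PySem.List.pyRange 0 (max 0 (i - w)) 1).filter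
        (fun j => decide (i ≠ j ∧ |i - j| ≤ w)) = [] := by
      apply List.filter_eq_nil_iff.mpr
      intro j hj
      simp only [PySem.List.mem_pyRange_one] at hj
      simp only [decide_eq_true_eq, not_and, abs_le]
      omega
    have h3 : (PySem.List.pyRange (min n (i + w + 1)) n 1).filter
        (fun j => decide (i ≠ j ∧ |i - j| ≤ w)) = [] := by
      apply List.filter_eq_nil_iff.mpr
      intro j hj
      simp only [PySem.List.mem_pyRange_one] at hj
      simp only [decide_eq_true_eq, not_and, abs_le]
      omega
    rw [PySem.List.pyRange_one_append 0 (max 0 (i - w)) n (by omega) (by omega),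
        PySem.List.pyRange_one_append (max 0 (i - w)) (min n (i + w + 1)) n (by omega) (by omega),
        List.filter_append, List.filter_append, h1, h3,
        List.nil_append, List.append_nil]
    apply List.filter_congr
    intro j hj
    simp only [PySem.List.mem_pyRange_one] at hj
    apply decide_eq_decide.mpr
    rw [abs_le]
    constructor
    · intro h; omega
    · intro h; omega

-- a contiguous index range read through pyGetD is the corresponding slice
lemma map_get_range (lo : List Int) (a b : Int) (h0 : 0 ≤ a) (hab : a ≤ b) (hb : b ≤ (lo.length : Int)) :
    (PySem.List.pyRange a b 1).map (fun j => PySem.List.pyGetD lo j 0)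
      = PySem.List.slice lo (some a) (some b) := by
  have hsplit := PySem.List.pyRange_one_append a b (lo.length : Int) hab hb
  have hdrop := PySem.List.map_pyGetD_pyRange' lo 0 h0
  rw [hsplit, List.map_append] at hdrop
  rw [PySem.List.slice_toNat lo h0 (by omega), ← hdrop]
  rw [List.take_left']
  simp only [List.length_map, PySem.List.length_pyRange_one]
  omega

-- fold of adds over a contiguous range of indices = one bulk Set.update of the slice
lemma foldl_add_update (lo : List Int) (sec1 a b : Int) (h0 : 0 ≤ a) (hab : a ≤ b)
    (hb : b ≤ (lo.length : Int)) (s : PySem.Set (Int × Int)) :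
    (PySem.List.pyRange a b 1).foldl
        (fun s j => PySem.Set.add s (sec1, PySem.List.pyGetD lo j 0)) s
      = PySem.Set.update s ((PySem.List.slice lo (some a) (some b)).map (fun sec2 => (sec1, sec2))) := by
  show _ = ((PySem.List.slice lo (some a) (some b)).map (fun sec2 => (sec1, sec2))).foldl PySem.Set.add s
  rw [← map_get_range lo a b h0 hab hb, List.map_map, List.foldl_map]
  rfl

lemma inner_eq (lo : List Int) (w i sec1 : Int) (hi0 : 0 ≤ i) (hin : i < (lo.length : Int))
    (s : PySem.Set (Int × Int)) :
    (PySem.List.enumerate lo 0).foldl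
        (fun s q => if i ≠ q.1 ∧ |i - q.1| ≤ w then PySem.Set.add s (sec1, q.2) else s) s
      = (if min (lo.length : Int) (i + w + 1) ≤ max 0 (i - w) then s
         else
           PySem.Set.update
             (PySem.Set.update s
               ((PySem.List.slice lo (some (max 0 (i - w))) (some i)).map (fun sec2 => (sec1, sec2))))
             ((PySem.List.slice lo (some (i + 1)) (some (min (lo.length : Int) (i + w + 1)))).map
               (fun sec2 => (sec1, sec2)))) := by
  rw [PySem.List.enumerate_eq_map_pyRange (d := 0), List.foldl_map]
  change (PySem.List.pyRange 0 (lo.length : Int) 1).foldl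
      (fun s j => if i ≠ j ∧ |i - j| ≤ w then PySem.Set.add s (sec1, PySem.List.pyGetD lo j 0) else s) s = _
  rw [foldl_ite_filter (PySem.List.pyRange 0 (lo.length : Int) 1)
        (fun j => i ≠ j ∧ |i - j| ≤ w) (fun s j => PySem.Set.add s (sec1, PySem.List.pyGetD lo j 0)) s,
      ranges_eq (lo.length : Int) w i hi0 hin]
  by_cases hss : min (lo.length : Int) (i + w + 1) ≤ max 0 (i - w)
  · rw [if_pos hss, PySem.List.pyRange_one_eq_nil hss, List.filter_nil, List.foldl_nil]
  · rw [if_neg hss]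
    have hb1 : max 0 (i - w) ≤ i := by omega
    have hb2 : i < min (lo.length : Int) (i + w + 1) := by omega
    rw [PySem.List.pyRange_one_append (max 0 (i - w)) i (min (lo.length : Int) (i + w + 1)) hb1 (by omega),
        PySem.List.pyRange_one_cons hb2,
        List.filter_append, List.filter_cons_of_neg (by simp),
        List.filter_eq_self.mpr (by
          intro j hj
          simp only [PySem.List.mem_pyRange_one] at hj
          simp only [decide_eq_true_eq]
          omega),
        List.filter_eq_self.mpr (by
          intro j hj
          simp only [PySem.List.mem_pyRange_one] at hj
          simp only [decide_eq_true_eq]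
          omega),
        List.foldl_append,
        foldl_add_update lo sec1 (max 0 (i - w)) i (by omega) hb1 (by omega),
        foldl_add_update lo sec1 (i + 1) (min (lo.length : Int) (i + w + 1)) (by omega) (by omega) (by omega)]


-- ===== VERDICT (by name: the statement is the Claim_ definition above) =====
theorem create_proximity_mask_spec : Claim_equal_create_proximity_mask := by
  intro lo w _
  show create_proximity_mask lo w = create_proximity_mask_alt lo w
  simp only [create_proximity_mask, create_proximity_mask_alt]
  apply PySem.List.foldl_congr_mem'
  intro p hp acc
  obtain ⟨k, hk, rfl⟩ := (PySem.List.mem_enumerate_iff _ _ _).mp hp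
  simp only [zero_add]
  exact inner_eq lo w (k : Int) lo[k] (by omega) (by exact_mod_cast hk) acc
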